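-- pv_equiv track=rewrite | github.com/gh0stshe11/webreaper | webreaper/cli.py | _host_in_scope
-- ===== SOURCE A (Python) =====
-- from typing import List, Optional, Set
--
-- def _host_in_scope(host: str, scope_hosts: Set[str], allow_subdomains: bool) -> bool:
--     if not scope_hosts:
--         return True
--     h = (host or "").lower()
--     for s in scope_hosts:
--         s = s.lower()
--         if h == s:
--             return True
--         if allow_subdomains and h.endswith("." + s):
--             return True
--     return False
-- ===== SOURCE B (Python) =====
-- def _host_in_scope(host, scope_hosts, allow_subdomains):
--     if not scope_hosts:
--         return True
--     low = {s.lower() for s in scope_hosts}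
--     h = (host or "").lower()
--     if h in low:
--         return True
--     if allow_subdomains:
--         for i, c in enumerate(h):
--             if c == "." and h[i + 1:] in low:
--                 return True
--     return False
-- ===== Notes on version B (the rewrite author's own statement) =====
-- stated objective: alternative
-- what changed: Instead of scanning every scope entry and calling endswith per entry, B builds a lowercased set of scope entries once, checks the host by one set membership, and (for subdomains) walks the host's dot positions testing each parent suffix against the set.
import Mathlib
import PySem

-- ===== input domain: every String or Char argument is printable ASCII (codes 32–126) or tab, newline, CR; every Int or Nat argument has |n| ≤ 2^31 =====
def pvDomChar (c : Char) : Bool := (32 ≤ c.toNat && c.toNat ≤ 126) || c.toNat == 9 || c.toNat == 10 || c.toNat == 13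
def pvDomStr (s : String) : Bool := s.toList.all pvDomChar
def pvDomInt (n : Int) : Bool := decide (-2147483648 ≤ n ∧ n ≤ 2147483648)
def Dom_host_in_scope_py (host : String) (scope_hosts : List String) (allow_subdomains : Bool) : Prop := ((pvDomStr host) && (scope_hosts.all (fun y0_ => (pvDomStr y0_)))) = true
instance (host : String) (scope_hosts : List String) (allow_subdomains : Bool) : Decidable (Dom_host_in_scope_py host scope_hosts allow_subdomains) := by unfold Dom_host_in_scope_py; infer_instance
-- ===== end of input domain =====

-- B replaces A's per-entry endswith scan of the scope by one lowercased set plus a walk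
-- over the host's dot positions (alternative traversal; return value is unchanged).

-- ===== PORT A =====
-- the 'for s in scope_hosts' loop with its early returns
def hisLoopA (h : List Char) (allow : Bool) : List String → Bool
  | [] => false
  | s :: rest =>
    let s' := PySem.Chars.lower s.toList
    if h = s' then true
    else if allow && PySem.Chars.endswith h ('.' :: s') then true
    else hisLoopA h allow rest

def host_in_scope_py (host : String) (scope_hosts : List String) (allow_subdomains : Bool) : Bool :=
  if scope_hosts = [] then true
  else
    -- h = (host or "").lower(): for a str argument this is host.lower() (lower "" = "")
    hisLoopA (PySem.Chars.lower host.toList) allow_subdomains scope_hosts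

-- ===== PORT B =====
-- the 'for i, c in enumerate(h)' loop: at position i with char c, h[i+1:] is the remainder
def hisSuffixB (low : PySem.Set (List Char)) : List Char → Bool
  | [] => false
  | c :: rest => if c = '.' && low.contains rest then true else hisSuffixB low rest

def host_in_scope_py_alt (host : String) (scope_hosts : List String) (allow_subdomains : Bool) : Bool :=
  if scope_hosts = [] then true
  else
    let low : PySem.Set (List Char) :=
      PySem.Set.ofList (scope_hosts.map (fun s => PySem.Chars.lower s.toList))
    let h := PySem.Chars.lower host.toList
    if low.contains h then true
    else if allow_subdomains then hisSuffixB low h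
    else false

-- ===== PRECONDITION & SPEC =====
def Spec_host_in_scope_py (host : String) (scope_hosts : List String) (allow_subdomains : Bool) (out : Bool) : Prop := out = host_in_scope_py_alt host scope_hosts allow_subdomains
instance (host : String) (scope_hosts : List String) (allow_subdomains : Bool) (out : Bool) : Decidable (Spec_host_in_scope_py host scope_hosts allow_subdomains out) := by unfold Spec_host_in_scope_py; infer_instance

-- ===== CLAIM (what is proved, stated in full; the proofs are below) =====
def Claim_equal_host_in_scope_py : Prop := ∀ (host : String) (scope_hosts : List String) (allow_subdomains : Bool), Dom_host_in_scope_py host scope_hosts allow_subdomains → Spec_host_in_scope_py host scope_hosts allow_subdomains (host_in_scope_py host scope_hosts allow_subdomains)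

-- ===== LEMMAS AND PROOFS =====

lemma hisLoopA_iff (h : List Char) (allow : Bool) (L : List String) :
    hisLoopA h allow L = true ↔
      ∃ s ∈ L, h = PySem.Chars.lower s.toList ∨
        (allow = true ∧ ('.' :: PySem.Chars.lower s.toList) <:+ h) := by
  induction L with
  | nil => simp [hisLoopA]
  | cons s rest ih =>
    simp only [hisLoopA]
    split_ifs with h1 h2
    · simp_all
    · simp only [Bool.and_eq_true, PySem.Chars.endswith_iff] at h2
      constructor
      · intro _; exact ⟨s, by simp, Or.inr h2⟩
      · intro _; rfl
    · simp only [Bool.and_eq_true, PySem.Chars.endswith_iff] at h2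
      rw [ih]
      constructor
      · rintro ⟨t, ht, hor⟩; exact ⟨t, by simp [ht], hor⟩
      · rintro ⟨t, ht, hor⟩
        rcases List.mem_cons.mp ht with rfl | ht'
        · rcases hor with hh | hh
          · exact absurd hh h1
          · exact absurd hh h2
        · exact ⟨t, ht', hor⟩

lemma hisSuffixB_iff (low : PySem.Set (List Char)) (h : List Char) :
    hisSuffixB low h = true ↔ ∃ pre suf, h = pre ++ '.' :: suf ∧ suf ∈ low := by
  induction h with
  | nil =>
    simp only [hisSuffixB]
    constructor
    · intro hF; cases hF
    · rintro ⟨pre, suf, heq, -⟩; simp at heq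
  | cons c rest ih =>
    simp only [hisSuffixB]
    split_ifs with h1
    · simp only [Bool.and_eq_true, decide_eq_true_eq, PySem.Set.contains_iff] at h1
      constructor
      · intro _; exact ⟨[], rest, by simp [h1.1], h1.2⟩
      · intro _; rfl
    · rw [ih]
      constructor
      · rintro ⟨pre, suf, heq, hmem⟩
        exact ⟨c :: pre, suf, by simp [heq], hmem⟩
      · rintro ⟨pre, suf, heq, hmem⟩
        cases pre with
        | nil =>
          simp only [List.nil_append, List.cons.injEq] at heq
          exfalso; apply h1
          simp only [Bool.and_eq_true, decide_eq_true_eq, PySem.Set.contains_iff]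
          exact ⟨heq.1, heq.2 ▸ hmem⟩
        | cons d pre' =>
          simp only [List.cons_append, List.cons.injEq] at heq
          exact ⟨pre', suf, heq.2, hmem⟩

lemma suffix_dot_iff (s' h : List Char) :
    ('.' :: s') <:+ h ↔ ∃ pre, h = pre ++ '.' :: s' := by
  constructor
  · rintro ⟨pre, rfl⟩; exact ⟨pre, rfl⟩
  · rintro ⟨pre, rfl⟩; exact ⟨pre, rfl⟩

lemma main_eq (h : List Char) (allow : Bool) (scope : List String) :
    hisLoopA h allow scope =
      (if (PySem.Set.ofList (scope.map (fun s => PySem.Chars.lower s.toList))).contains h then true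
       else if allow then hisSuffixB (PySem.Set.ofList (scope.map (fun s => PySem.Chars.lower s.toList))) h
       else false) := by
  have hmem : ∀ x : List Char,
      x ∈ PySem.Set.ofList (scope.map (fun s => PySem.Chars.lower s.toList)) ↔
      ∃ s ∈ scope, x = PySem.Chars.lower s.toList := by
    intro x
    rw [PySem.Set.mem_ofList, List.mem_map]
    constructor
    · rintro ⟨s, hs, rfl⟩; exact ⟨s, hs, rfl⟩
    · rintro ⟨s, hs, rfl⟩; exact ⟨s, hs, rfl⟩
  rw [Bool.eq_iff_iff, hisLoopA_iff]
  constructor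
  · rintro ⟨s, hs, hor⟩
    rcases hor with heq | ⟨hal, hsuf⟩
    · rw [if_pos]
      rw [PySem.Set.contains_iff, hmem]
      exact ⟨s, hs, heq⟩
    · by_cases hc : (PySem.Set.ofList (scope.map (fun s => PySem.Chars.lower s.toList))).contains h = true
      · rw [if_pos hc]
      · rw [if_neg hc, if_pos hal, hisSuffixB_iff]
        rcases (suffix_dot_iff _ _).mp hsuf with ⟨pre, rfl⟩
        exact ⟨pre, _, rfl, (hmem _).mpr ⟨s, hs, rfl⟩⟩
  · intro hb
    by_cases hc : (PySem.Set.ofList (scope.map (fun s => PySem.Chars.lower s.toList))).contains h = true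
    · rw [PySem.Set.contains_iff, hmem] at hc
      rcases hc with ⟨s, hs, heq⟩
      exact ⟨s, hs, Or.inl heq⟩
    · rw [if_neg hc] at hb
      rcases allow with _ | _
      · simp at hb
      · rw [if_pos rfl, hisSuffixB_iff] at hb
        rcases hb with ⟨pre, suf, heq, hmem'⟩
        rcases (hmem suf).mp hmem' with ⟨s, hs, rfl⟩
        exact ⟨s, hs, Or.inr ⟨rfl, (suffix_dot_iff _ _).mpr ⟨pre, heq⟩⟩⟩

-- ===== VERDICT (by name: the statement is the Claim_ definition above) =====
theorem host_in_scope_py_spec : Claim_equal_host_in_scope_py := by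
  intro host scope allow _
  unfold Spec_host_in_scope_py host_in_scope_py host_in_scope_py_alt
  by_cases hsc : scope = []
  · simp [hsc]
  · simp only [hsc, ite_false]
    exact main_eq (PySem.Chars.lower host.toList) allow scope
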